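-- pv_equiv track=rewrite | github.com/erikhenriksson/papygreek-api | app/textmanager/variations.py | get_matching_blocks
-- ===== SOURCE A (Python) =====
-- from collections import namedtuple
--
-- Match = namedtuple("Match", "a b size")
--
-- def find_longest_match(orig, reg_index, orig_start, orig_end, reg_start, reg_end):
--     """Find longest matching sequence"""
--     best_start, best_end, best_size = orig_start, reg_start, 0
--     longest_match = {}
--
--     # Iterate orig chars
--     for orig_i in range(orig_start, orig_end):
--         new_longest_match = {}
--
--         # Get indexes in reg for orig char
--         for reg_i in reg_index.get(orig[orig_i], []):
--             # Index before the current block; pass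
--             if reg_i < reg_start:
--                 continue
--
--             # Index over the block, break
--             if reg_i >= reg_end:
--                 break
--
--             # Get longest
--             longest_size = new_longest_match[reg_i] = (
--                 longest_match.get(reg_i - 1, 0) + 1
--             )
--
--             # If this is now biggest, collect
--             if longest_size > best_size:
--                 best_start = orig_i - longest_size + 1
--                 best_end = reg_i - longest_size + 1
--                 best_size = longest_size
--
--         longest_match = new_longest_match
--
--     return Match(best_start, best_end, best_size)
--
-- def get_matching_blocks(orig, reg, reg_index):
--     """Get blocks that match"""
--     orig_len = len(orig)
--     reg_len = len(reg)
--
--     # Start with the complete blocks given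
--     queue = [(0, orig_len, 0, reg_len)]
--     matching_blocks = []
--     while queue:
--         orig_start, orig_end, reg_start, reg_end = queue.pop()
--
--         match_start, match_end, size = x = find_longest_match(
--             orig, reg_index, orig_start, orig_end, reg_start, reg_end
--         )
--
--         # If match of size > 0:
--         if size:
--             # Collect this match
--             matching_blocks.append(x)
--
--             if orig_start < match_start and reg_start < match_end:
--                 queue.append((orig_start, match_start, reg_start, match_end))
--             if match_start + size < orig_end and match_end + size < reg_end:
--                 queue.append((match_start + size, orig_end, match_end + size, reg_end))
--
--     # Sort by match start
--     matching_blocks.sort()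
--
--     # Collapse adjacent same operation blocks
--     i1 = j1 = k1 = 0
--     non_adjacent = []
--     for i2, j2, k2 in matching_blocks:
--         # Is this block adjacent to i1, j1, k1?
--         if i1 + k1 == i2 and j1 + k1 == j2:
--             # Yes, so collapse them -- this just increases the length of
--             # the first block by the length of the second, and the first
--             # block so lengthened remains the block to compare against.
--             k1 += k2
--         else:
--             # Not adjacent.  Remember the first block (k1==0 means it's
--             # the dummy we started with), and make the second block the
--             # new block to compare against.
--             if k1:
--                 non_adjacent.append((i1, j1, k1))
--             i1, j1, k1 = i2, j2, k2
--     if k1: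
--         non_adjacent.append((i1, j1, k1))
--     non_adjacent.append((orig_len, reg_len, 0))
--     return list(map(Match._make, non_adjacent))
-- ===== SOURCE B (Python) =====
-- from collections import namedtuple
--
-- Match = namedtuple("Match", "a b size")
--
-- def find_longest_match(orig, reg_index, orig_start, orig_end, reg_start, reg_end):
--     """Find longest matching sequence (kept unchanged)"""
--     best_start, best_end, best_size = orig_start, reg_start, 0
--     longest_match = {}
--     for orig_i in range(orig_start, orig_end):
--         new_longest_match = {}
--         for reg_i in reg_index.get(orig[orig_i], []):
--             if reg_i < reg_start:
--                 continue
--             if reg_i >= reg_end: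
--                 break
--             longest_size = new_longest_match[reg_i] = (
--                 longest_match.get(reg_i - 1, 0) + 1
--             )
--             if longest_size > best_size:
--                 best_start = orig_i - longest_size + 1
--                 best_end = reg_i - longest_size + 1
--                 best_size = longest_size
--         longest_match = new_longest_match
--     return Match(best_start, best_end, best_size)
--
-- def get_matching_blocks(orig, reg, reg_index):
--     """Get blocks that match — recursive divide and conquer instead of an explicit stack.
--     The final sort makes the collection order irrelevant."""
--     orig_len = len(orig)
--     reg_len = len(reg)
--     matching_blocks = []
--
--     def recurse(orig_start, orig_end, reg_start, reg_end):
--         match_start, match_end, size = x = find_longest_match(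
--             orig, reg_index, orig_start, orig_end, reg_start, reg_end
--         )
--         if size:
--             matching_blocks.append(x)
--             # window to the right of the match
--             if match_start + size < orig_end and match_end + size < reg_end:
--                 recurse(match_start + size, orig_end, match_end + size, reg_end)
--             # window to the left of the match
--             if orig_start < match_start and reg_start < match_end:
--                 recurse(orig_start, match_start, reg_start, match_end)
--
--     recurse(0, orig_len, 0, reg_len)
--
--     matching_blocks.sort()
--
--     # Collapse adjacent same operation blocks
--     i1 = j1 = k1 = 0
--     non_adjacent = []
--     for i2, j2, k2 in matching_blocks:
--         if i1 + k1 == i2 and j1 + k1 == j2: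
--             k1 += k2
--         else:
--             if k1:
--                 non_adjacent.append((i1, j1, k1))
--             i1, j1, k1 = i2, j2, k2
--     if k1:
--         non_adjacent.append((i1, j1, k1))
--     non_adjacent.append((orig_len, reg_len, 0))
--     return list(map(Match._make, non_adjacent))
-- ===== Notes on version B (the rewrite author's own statement) =====
-- stated objective: alternative
-- what changed: The explicit work-queue (while queue: pop/push windows) in get_matching_blocks is replaced by a recursive divide-and-conquer helper that recurses into the right and left sub-windows of each longest match; find_longest_match and the sort/collapse stage are unchanged.
import Mathlib
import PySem

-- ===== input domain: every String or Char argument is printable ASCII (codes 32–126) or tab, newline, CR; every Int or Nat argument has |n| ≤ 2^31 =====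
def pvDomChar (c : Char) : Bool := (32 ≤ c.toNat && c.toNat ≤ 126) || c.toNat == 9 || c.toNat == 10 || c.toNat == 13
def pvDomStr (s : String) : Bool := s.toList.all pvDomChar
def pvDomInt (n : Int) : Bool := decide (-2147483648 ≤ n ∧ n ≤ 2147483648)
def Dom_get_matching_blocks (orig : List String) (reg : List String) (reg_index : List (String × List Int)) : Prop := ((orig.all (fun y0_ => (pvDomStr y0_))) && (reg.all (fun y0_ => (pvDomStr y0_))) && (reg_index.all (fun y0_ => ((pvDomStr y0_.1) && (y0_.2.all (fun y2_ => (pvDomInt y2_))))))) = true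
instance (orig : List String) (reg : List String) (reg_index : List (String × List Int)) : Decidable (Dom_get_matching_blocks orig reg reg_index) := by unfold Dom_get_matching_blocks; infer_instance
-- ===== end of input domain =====

-- B changes only the window traversal in get_matching_blocks: the explicit work-queue
-- loop becomes a recursive divide-and-conquer helper (objective: alternative decomposition;
-- find_longest_match and the sort/collapse stage are shared by both Pythons and ported once).
-- Both loop ports carry a fuel argument as a totality guard; fuel is provably sufficient
-- (each pushed/recursed window is strictly smaller), so it never changes the computed value.

-- ===== PORT A =====

-- shared helper: find_longest_match (byte-identical in Source A and Source B, ported once).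
-- inner `for reg_i in reg_index.get(...)` loop; `continue` skips, `break` returns the state.
-- state = (new_longest_match, best_start, best_end, best_size); `lm` is the previous dict.
def flmInner (lm : PySem.Dict Int Int) (origI regStart regEnd : Int) :
    List Int → (PySem.Dict Int Int × Int × Int × Int) → (PySem.Dict Int Int × Int × Int × Int)
  | [], st => st
  | regI :: rest, st =>
    if regI < regStart then flmInner lm origI regStart regEnd rest st
    else if regEnd ≤ regI then st
    else
      let v := PySem.Dict.getD lm (regI - 1) 0 + 1
      let nlm := PySem.Dict.insert st.1 regI v
      let st' := if st.2.2.2 < v then (nlm, origI - v + 1, regI - v + 1, v) else (nlm, st.2)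
      flmInner lm origI regStart regEnd rest st'

-- orig[orig_i]: exact via pyGetD because every index produced by get_matching_blocks'
-- windows lies in [0, len(orig)) (windows start at (0, len) and only shrink inwards).
def find_longest_match (orig : List String) (reg_index : List (String × List Int))
    (orig_start orig_end reg_start reg_end : Int) : Int × Int × Int :=
  let r := (PySem.List.pyRange orig_start orig_end 1).foldl
    (fun st origI =>
      let js := PySem.Dict.getD (PySem.Dict.mk reg_index) (PySem.List.pyGetD orig origI "") []
      flmInner st.1 origI reg_start reg_end js (PySem.Dict.empty, st.2))
    (PySem.Dict.empty, orig_start, reg_start, 0)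
  r.2

-- shared helper: `matching_blocks.sort()` + the adjacency-collapse loop (identical in Source A
-- and Source B, ported once).  Python sorts the Match tuples lexicographically; the match-start
-- components collected here are pairwise distinct (matches of disjoint orig windows), so
-- sorting by the first component is exact in this context.
def collapse_sort (orig_len reg_len : Int) (mbs : List (Int × Int × Int)) : List (Int × Int × Int) :=
  let sortedBlocks := PySem.List.sorted mbs (fun x => x.1) false
  let r := sortedBlocks.foldl
    (fun (st : Int × Int × Int × List (Int × Int × Int)) m =>
      if st.1 + st.2.2.1 = m.1 ∧ st.2.1 + st.2.2.1 = m.2.1 then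
        (st.1, st.2.1, st.2.2.1 + m.2.2, st.2.2.2)
      else
        (m.1, m.2.1, m.2.2, if st.2.2.1 ≠ 0 then st.2.2.2 ++ [(st.1, st.2.1, st.2.2.1)] else st.2.2.2))
    (0, 0, 0, [])
  (if r.2.2.1 ≠ 0 then r.2.2.2 ++ [(r.1, r.2.1, r.2.2.1)] else r.2.2.2) ++ [(orig_len, reg_len, 0)]

-- fuel bound for A's queue loop (sum over the queue of 3^(orig window width); proved
-- strictly decreasing in the lemmas below, so this much fuel is always enough)
def wMeasure (w : Int × Int × Int × Int) : Nat := 3 ^ (w.2.1 - w.1).toNat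
def qMeasure (q : List (Int × Int × Int × Int)) : Nat := (q.map wMeasure).sum

-- A's `while queue:` loop: pop from the end, collect the match, push left then right window
def gmbLoop (orig : List String) (reg_index : List (String × List Int)) :
    Nat → List (Int × Int × Int × Int) → List (Int × Int × Int) → List (Int × Int × Int)
  | 0, _, acc => acc
  | fuel + 1, q, acc =>
    if h : q = [] then acc
    else
      let w := q.getLast h
      let rest := q.dropLast
      match find_longest_match orig reg_index w.1 w.2.1 w.2.2.1 w.2.2.2 with
      | (bs, be, sz) =>
        if sz ≠ 0 then
          let acc' := acc ++ [(bs, be, sz)]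
          let q1 := if w.1 < bs ∧ w.2.2.1 < be then rest ++ [(w.1, bs, w.2.2.1, be)] else rest
          let q2 := if bs + sz < w.2.1 ∧ be + sz < w.2.2.2 then q1 ++ [(bs + sz, w.2.1, be + sz, w.2.2.2)] else q1
          gmbLoop orig reg_index fuel q2 acc'
        else gmbLoop orig reg_index fuel rest acc

def get_matching_blocks (orig : List String) (reg : List String) (reg_index : List (String × List Int)) : List (Int × Int × Int) :=
  let orig_len : Int := orig.length
  let reg_len : Int := reg.length
  collapse_sort orig_len reg_len
    (gmbLoop orig reg_index (qMeasure [(0, orig_len, 0, reg_len)]) [(0, orig_len, 0, reg_len)] [])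

-- ===== PORT B =====

-- B's recursive divide and conquer: collect the longest match of the window, then recurse
-- into the right and the left sub-windows (Source B's `recurse`; `matching_blocks` is `acc`;
-- the fuel bounds the recursion depth by the orig window width, which strictly shrinks)
def gmbRec (orig : List String) (reg_index : List (String × List Int)) :
    Nat → Int → Int → Int → Int → List (Int × Int × Int) → List (Int × Int × Int)
  | 0, _, _, _, _, acc => acc
  | fuel + 1, os, oe, rs, re, acc =>
    match find_longest_match orig reg_index os oe rs re with
    | (bs, be, sz) =>
      if sz ≠ 0 then
        let acc1 := acc ++ [(bs, be, sz)]
        let acc2 := if bs + sz < oe ∧ be + sz < re then gmbRec orig reg_index fuel (bs + sz) oe (be + sz) re acc1 else acc1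
        if os < bs ∧ rs < be then gmbRec orig reg_index fuel os bs rs be acc2 else acc2
      else acc

def get_matching_blocks_alt (orig : List String) (reg : List String) (reg_index : List (String × List Int)) : List (Int × Int × Int) :=
  let orig_len : Int := orig.length
  let reg_len : Int := reg.length
  collapse_sort orig_len reg_len (gmbRec orig reg_index (orig.length + 1) 0 orig_len 0 reg_len [])

-- ===== PRECONDITION & SPEC =====
def Spec_get_matching_blocks (orig : List String) (reg : List String) (reg_index : List (String × List Int)) (out : List (Int × Int × Int)) : Prop := out = get_matching_blocks_alt orig reg reg_index
instance (orig : List String) (reg : List String) (reg_index : List (String × List Int)) (out : List (Int × Int × Int)) : Decidable (Spec_get_matching_blocks orig reg reg_index out) := by unfold Spec_get_matching_blocks; infer_instance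

-- ===== CLAIM (what is proved, stated in full; the proofs are below) =====
def Claim_equal_get_matching_blocks : Prop := ∀ (orig : List String) (reg : List String) (reg_index : List (String × List Int)), Dom_get_matching_blocks orig reg reg_index → Spec_get_matching_blocks orig reg reg_index (get_matching_blocks orig reg reg_index)

-- ===== LEMMAS AND PROOFS =====

-- a positive-size match ends inside (orig_start, orig_end]
theorem flmInner_bounds (lo hi origI regStart regEnd : Int) (lm : PySem.Dict Int Int)
    (js : List Int) (st : PySem.Dict Int Int × Int × Int × Int)
    (hst : 0 ≤ st.2.2.2 ∧ (0 < st.2.2.2 → lo < st.2.1 + st.2.2.2 ∧ st.2.1 + st.2.2.2 ≤ hi))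
    (hlo : lo ≤ origI) (hhi : origI < hi) :
    0 ≤ (flmInner lm origI regStart regEnd js st).2.2.2 ∧
      (0 < (flmInner lm origI regStart regEnd js st).2.2.2 →
        lo < (flmInner lm origI regStart regEnd js st).2.1 + (flmInner lm origI regStart regEnd js st).2.2.2 ∧
        (flmInner lm origI regStart regEnd js st).2.1 + (flmInner lm origI regStart regEnd js st).2.2.2 ≤ hi) := by
  induction js generalizing st with
  | nil => simpa [flmInner] using hst
  | cons j rest ih =>
    simp only [flmInner]
    split
    · exact ih st hst
    · split
      · exact hst
      · apply ih
        split
        · dsimp only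
          exact ⟨by omega, fun _ => ⟨by omega, by omega⟩⟩
        · exact hst

theorem flm_bounds (orig : List String) (reg_index : List (String × List Int))
    (os oe rs re : Int) :
    0 ≤ (find_longest_match orig reg_index os oe rs re).2.2 ∧
      (0 < (find_longest_match orig reg_index os oe rs re).2.2 →
        os < (find_longest_match orig reg_index os oe rs re).1 + (find_longest_match orig reg_index os oe rs re).2.2 ∧
        (find_longest_match orig reg_index os oe rs re).1 + (find_longest_match orig reg_index os oe rs re).2.2 ≤ oe) := by
  unfold find_longest_match
  have h : ∀ (l : List Int) (st : PySem.Dict Int Int × Int × Int × Int),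
      (∀ x ∈ l, os ≤ x ∧ x < oe) →
      (0 ≤ st.2.2.2 ∧ (0 < st.2.2.2 → os < st.2.1 + st.2.2.2 ∧ st.2.1 + st.2.2.2 ≤ oe)) →
      let f := (fun (st : PySem.Dict Int Int × Int × Int × Int) origI =>
          let js := PySem.Dict.getD (PySem.Dict.mk reg_index) (PySem.List.pyGetD orig origI "") []
          flmInner st.1 origI rs re js (PySem.Dict.empty, st.2))
      (0 ≤ (l.foldl f st).2.2.2 ∧
        (0 < (l.foldl f st).2.2.2 →
          os < (l.foldl f st).2.1 + (l.foldl f st).2.2.2 ∧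
          (l.foldl f st).2.1 + (l.foldl f st).2.2.2 ≤ oe)) := by
    intro l
    induction l with
    | nil => intro st _ hst; simpa using hst
    | cons x xs ih =>
      intro st hmem hst
      simp only [List.foldl_cons]
      apply ih
      · intro y hy; exact hmem y (List.mem_cons_of_mem _ hy)
      · have hx := hmem x (List.mem_cons_self)
        exact flmInner_bounds os oe x rs re st.1 _ (PySem.Dict.empty, st.2) hst hx.1 hx.2
  apply h
  · intro x hx
    exact PySem.List.mem_pyRange_one.mp hx
  · refine ⟨?_, ?_⟩ <;> dsimp only <;> omega

-- the queue measure strictly decreases at every iteration of A's loop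
theorem qMeasure_step (orig : List String) (reg_index : List (String × List Int))
    (q : List (Int × Int × Int × Int)) (h : ¬ q = []) (bs be sz : Int)
    (hm : find_longest_match orig reg_index (q.getLast h).1 (q.getLast h).2.1 (q.getLast h).2.2.1 (q.getLast h).2.2.2 = (bs, be, sz))
    (hsz : sz ≠ 0) :
    qMeasure (if bs + sz < (q.getLast h).2.1 ∧ be + sz < (q.getLast h).2.2.2 then
        (if (q.getLast h).1 < bs ∧ (q.getLast h).2.2.1 < be then
            q.dropLast ++ [((q.getLast h).1, bs, (q.getLast h).2.2.1, be)]
          else q.dropLast) ++ [(bs + sz, (q.getLast h).2.1, be + sz, (q.getLast h).2.2.2)]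
      else (if (q.getLast h).1 < bs ∧ (q.getLast h).2.2.1 < be then
            q.dropLast ++ [((q.getLast h).1, bs, (q.getLast h).2.2.1, be)]
          else q.dropLast)) < qMeasure q := by
  have hb := flm_bounds orig reg_index (q.getLast h).1 (q.getLast h).2.1 (q.getLast h).2.2.1 (q.getLast h).2.2.2
  rw [hm] at hb
  dsimp only at hb
  obtain ⟨h0, hbd⟩ := hb
  have hb2 := hbd (by omega)
  conv_rhs => rw [show q = q.dropLast ++ [q.getLast h] from (List.dropLast_append_getLast h).symm]
  simp only [qMeasure, List.map_append, List.sum_append, List.map_cons, List.map_nil,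
    List.sum_cons, List.sum_nil, wMeasure]
  have hk : 1 ≤ ((q.getLast h).2.1 - (q.getLast h).1).toNat := by omega
  have hpow : ∀ m : Nat, m + 1 ≤ ((q.getLast h).2.1 - (q.getLast h).1).toNat →
      3 ^ m ≤ 3 ^ (((q.getLast h).2.1 - (q.getLast h).1).toNat - 1) :=
    fun m hm' => Nat.pow_le_pow_right (by norm_num) (by omega)
  have hp : 0 < 3 ^ (((q.getLast h).2.1 - (q.getLast h).1).toNat - 1) :=
    Nat.pow_pos (by norm_num)
  have h3 : 3 ^ (((q.getLast h).2.1 - (q.getLast h).1).toNat - 1) +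
      3 ^ (((q.getLast h).2.1 - (q.getLast h).1).toNat - 1) <
      3 ^ (((q.getLast h).2.1 - (q.getLast h).1).toNat) := by
    have he : (3:ℕ) ^ (((q.getLast h).2.1 - (q.getLast h).1).toNat) =
        3 * 3 ^ (((q.getLast h).2.1 - (q.getLast h).1).toNat - 1) := by
      conv_lhs => rw [show ((q.getLast h).2.1 - (q.getLast h).1).toNat =
        (((q.getLast h).2.1 - (q.getLast h).1).toNat - 1) + 1 by omega]
      rw [pow_succ']
    omega
  split
  · rename_i hR
    split
    · rename_i hL
      simp only [List.map_append, List.sum_append, List.map_cons, List.map_nil,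
        List.sum_cons, List.sum_nil, wMeasure]
      have e1 := hpow ((bs - (q.getLast h).1).toNat) (by omega)
      have e2 := hpow (((q.getLast h).2.1 - (bs + sz)).toNat) (by omega)
      omega
    · simp only [List.map_append, List.sum_append, List.map_cons, List.map_nil,
        List.sum_cons, List.sum_nil, wMeasure]
      have e2 := hpow (((q.getLast h).2.1 - (bs + sz)).toNat) (by omega)
      omega
  · split
    · rename_i hL
      simp only [List.map_append, List.sum_append, List.map_cons, List.map_nil,
        List.sum_cons, List.sum_nil, wMeasure]
      have e1 := hpow ((bs - (q.getLast h).1).toNat) (by omega)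
      omega
    · omega

theorem qMeasure_drop (q : List (Int × Int × Int × Int)) (h : ¬ q = []) :
    qMeasure q.dropLast < qMeasure q := by
  conv_rhs => rw [show q = q.dropLast ++ [q.getLast h] from (List.dropLast_append_getLast h).symm]
  simp only [qMeasure, List.map_append, List.sum_append, List.map_cons, List.map_nil,
    List.sum_cons, List.sum_nil]
  have hp : 0 < wMeasure (q.getLast h) := Nat.pow_pos (by norm_num)
  omega

-- one-step unfolding of gmbRec at known find_longest_match result
theorem gmbRec_step (orig : List String) (reg_index : List (String × List Int))
    (fuel : Nat) (os oe rs re : Int) (acc : List (Int × Int × Int)) (bs be sz : Int)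
    (hm : find_longest_match orig reg_index os oe rs re = (bs, be, sz)) :
    gmbRec orig reg_index (fuel + 1) os oe rs re acc =
      if sz ≠ 0 then
        (if os < bs ∧ rs < be then
           gmbRec orig reg_index fuel os bs rs be
             (if bs + sz < oe ∧ be + sz < re then
                gmbRec orig reg_index fuel (bs + sz) oe (be + sz) re (acc ++ [(bs, be, sz)])
              else acc ++ [(bs, be, sz)])
         else (if bs + sz < oe ∧ be + sz < re then
                gmbRec orig reg_index fuel (bs + sz) oe (be + sz) re (acc ++ [(bs, be, sz)])
              else acc ++ [(bs, be, sz)]))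
      else acc := by
  simp only [gmbRec, hm]

-- with sufficient fuel (more than the orig window width) gmbRec's value does not depend on the fuel
theorem gmbRec_fuel_irrel (orig : List String) (reg_index : List (String × List Int)) :
    ∀ (f : Nat) (g : Nat) (os oe rs re : Int) (acc : List (Int × Int × Int)),
      (oe - os).toNat < f → (oe - os).toNat < g →
      gmbRec orig reg_index f os oe rs re acc = gmbRec orig reg_index g os oe rs re acc := by
  intro f
  induction f with
  | zero => intro g os oe rs re acc hf; omega
  | succ n ih =>
    intro g os oe rs re acc hf hg
    match g, hg with
    | m + 1, hg =>
      simp only [gmbRec]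
      rcases hflm : find_longest_match orig reg_index os oe rs re with ⟨bs, be, sz⟩
      have hb := flm_bounds orig reg_index os oe rs re
      rw [hflm] at hb
      dsimp only at hb
      by_cases hsz : sz ≠ 0
      · have hbd := hb.2 (by omega)
        simp only [if_pos hsz]
        by_cases hR : bs + sz < oe ∧ be + sz < re <;> by_cases hL : os < bs ∧ rs < be
        · simp only [if_pos hR, if_pos hL]
          rw [ih m (bs + sz) oe (be + sz) re _ (by omega) (by omega),
            ih m os bs rs be _ (by omega) (by omega)]
        · simp only [if_pos hR, if_neg hL]
          rw [ih m (bs + sz) oe (be + sz) re _ (by omega) (by omega)]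
        · simp only [if_neg hR, if_pos hL]
          rw [ih m os bs rs be _ (by omega) (by omega)]
        · simp only [if_neg hR, if_neg hL]
      · simp only [if_neg hsz]
  termination_by f => f

-- the accumulator is a pure prefix of gmbRec's result
theorem gmbRec_acc (orig : List String) (reg_index : List (String × List Int)) :
    ∀ (fuel : Nat) (os oe rs re : Int) (acc : List (Int × Int × Int)),
      gmbRec orig reg_index fuel os oe rs re acc = acc ++ gmbRec orig reg_index fuel os oe rs re [] := by
  intro fuel
  induction fuel with
  | zero => intro os oe rs re acc; simp [gmbRec]
  | succ n ih =>
    intro os oe rs re acc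
    simp only [gmbRec]
    rcases hflm : find_longest_match orig reg_index os oe rs re with ⟨bs, be, sz⟩
    by_cases hsz : sz ≠ 0
    · simp only [if_pos hsz]
      by_cases hR : bs + sz < oe ∧ be + sz < re <;> by_cases hL : os < bs ∧ rs < be
      · simp only [if_pos hR, if_pos hL]
        rw [ih (bs + sz) oe (be + sz) re (acc ++ [(bs, be, sz)]),
          ih (bs + sz) oe (be + sz) re ([] ++ [(bs, be, sz)]),
          ih os bs rs be (acc ++ [(bs, be, sz)] ++ gmbRec orig reg_index n (bs + sz) oe (be + sz) re []),
          ih os bs rs be ([] ++ [(bs, be, sz)] ++ gmbRec orig reg_index n (bs + sz) oe (be + sz) re [])]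
        simp [List.append_assoc]
      · simp only [if_pos hR, if_neg hL]
        rw [ih (bs + sz) oe (be + sz) re (acc ++ [(bs, be, sz)]),
          ih (bs + sz) oe (be + sz) re ([] ++ [(bs, be, sz)])]
        simp [List.append_assoc]
      · simp only [if_neg hR, if_pos hL]
        rw [ih os bs rs be (acc ++ [(bs, be, sz)]), ih os bs rs be ([] ++ [(bs, be, sz)])]
        simp [List.append_assoc]
      · simp [if_neg hR, if_neg hL]
    · simp [hsz]

-- A's queue loop, run with enough fuel, collects exactly B's matches window by window
theorem gmbLoop_eq_flat (orig : List String) (reg_index : List (String × List Int)) :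
    ∀ (fuel : Nat) (q : List (Int × Int × Int × Int)) (acc : List (Int × Int × Int)),
      qMeasure q ≤ fuel →
      gmbLoop orig reg_index fuel q acc =
        acc ++ q.reverse.flatMap
          (fun w => gmbRec orig reg_index ((w.2.1 - w.1).toNat + 1) w.1 w.2.1 w.2.2.1 w.2.2.2 []) := by
  intro fuel
  induction fuel with
  | zero =>
    intro q acc hfe
    cases q with
    | nil => simp [gmbLoop]
    | cons w t =>
      exfalso
      have hp : 0 < wMeasure w := Nat.pow_pos (by norm_num)
      simp [qMeasure] at hfe
      omega
  | succ n ih =>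
    intro q acc hfe
    by_cases h : q = []
    · subst h; simp [gmbLoop]
    · simp only [gmbLoop, dif_neg h]
      rcases hflm : find_longest_match orig reg_index (q.getLast h).1 (q.getLast h).2.1 (q.getLast h).2.2.1 (q.getLast h).2.2.2 with ⟨bs, be, sz⟩
      have hb := flm_bounds orig reg_index (q.getLast h).1 (q.getLast h).2.1 (q.getLast h).2.2.1 (q.getLast h).2.2.2
      rw [hflm] at hb
      dsimp only at hb
      conv_rhs => rw [show q = q.dropLast ++ [q.getLast h] from (List.dropLast_append_getLast h).symm]
      simp only [List.reverse_append, List.reverse_cons, List.reverse_nil, List.nil_append,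
        List.singleton_append, List.flatMap_cons]
      by_cases hsz : sz ≠ 0
      · have hbd := hb.2 (by omega)
        simp only [if_pos hsz]
        rw [ih _ _ (by
          have := qMeasure_step orig reg_index q h bs be sz hflm hsz
          omega)]
        -- unfold B's per-window recursion one step
        rw [gmbRec_step orig reg_index (((q.getLast h).2.1 - (q.getLast h).1).toNat)
            (q.getLast h).1 (q.getLast h).2.1 (q.getLast h).2.2.1 (q.getLast h).2.2.2 [] bs be sz hflm,
          if_pos hsz]
        by_cases hR : bs + sz < (q.getLast h).2.1 ∧ be + sz < (q.getLast h).2.2.2 <;>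
          by_cases hL : (q.getLast h).1 < bs ∧ (q.getLast h).2.2.1 < be
        · simp only [if_pos hR, if_pos hL]
          simp only [List.reverse_append, List.reverse_cons, List.reverse_nil, List.nil_append,
            List.singleton_append, List.flatMap_cons]
          rw [gmbRec_fuel_irrel orig reg_index (((q.getLast h).2.1 - (q.getLast h).1).toNat) (((q.getLast h).2.1 - (bs + sz)).toNat + 1)
              (bs + sz) (q.getLast h).2.1 (be + sz) (q.getLast h).2.2.2 [(bs, be, sz)] (by omega) (by omega),
            gmbRec_fuel_irrel orig reg_index (((q.getLast h).2.1 - (q.getLast h).1).toNat) ((bs - (q.getLast h).1).toNat + 1)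
              (q.getLast h).1 bs (q.getLast h).2.2.1 be _ (by omega) (by omega)]
          rw [gmbRec_acc orig reg_index (((q.getLast h).2.1 - (bs + sz)).toNat + 1)
              (bs + sz) (q.getLast h).2.1 (be + sz) (q.getLast h).2.2.2 [(bs, be, sz)]]
          rw [gmbRec_acc orig reg_index ((bs - (q.getLast h).1).toNat + 1)
              (q.getLast h).1 bs (q.getLast h).2.2.1 be
              ([(bs, be, sz)] ++ gmbRec orig reg_index (((q.getLast h).2.1 - (bs + sz)).toNat + 1) (bs + sz) (q.getLast h).2.1 (be + sz) (q.getLast h).2.2.2 [])]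
          simp [List.append_assoc]
        · simp only [if_pos hR, if_neg hL]
          simp only [List.reverse_append, List.reverse_cons, List.reverse_nil, List.nil_append,
            List.singleton_append, List.flatMap_cons]
          rw [gmbRec_fuel_irrel orig reg_index (((q.getLast h).2.1 - (q.getLast h).1).toNat) (((q.getLast h).2.1 - (bs + sz)).toNat + 1)
              (bs + sz) (q.getLast h).2.1 (be + sz) (q.getLast h).2.2.2 [(bs, be, sz)] (by omega) (by omega)]
          rw [gmbRec_acc orig reg_index (((q.getLast h).2.1 - (bs + sz)).toNat + 1)
              (bs + sz) (q.getLast h).2.1 (be + sz) (q.getLast h).2.2.2 [(bs, be, sz)]]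
          simp [List.append_assoc]
        · simp only [if_neg hR, if_pos hL]
          simp only [List.reverse_append, List.reverse_cons, List.reverse_nil, List.nil_append,
            List.singleton_append, List.flatMap_cons]
          rw [gmbRec_fuel_irrel orig reg_index (((q.getLast h).2.1 - (q.getLast h).1).toNat) ((bs - (q.getLast h).1).toNat + 1)
              (q.getLast h).1 bs (q.getLast h).2.2.1 be [(bs, be, sz)] (by omega) (by omega)]
          rw [gmbRec_acc orig reg_index ((bs - (q.getLast h).1).toNat + 1)
              (q.getLast h).1 bs (q.getLast h).2.2.1 be [(bs, be, sz)]]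
          simp [List.append_assoc]
        · simp [if_neg hR, if_neg hL, List.append_assoc]
      · simp only [if_neg hsz]
        rw [ih _ _ (by have := qMeasure_drop q h; omega)]
        rw [gmbRec_step orig reg_index (((q.getLast h).2.1 - (q.getLast h).1).toNat)
            (q.getLast h).1 (q.getLast h).2.1 (q.getLast h).2.2.1 (q.getLast h).2.2.2 [] bs be sz hflm,
          if_neg hsz]
        simp

-- ===== VERDICT (by name: the statement is the Claim_ definition above) =====
theorem get_matching_blocks_spec : Claim_equal_get_matching_blocks := by
  intro orig reg reg_index _
  unfold Spec_get_matching_blocks get_matching_blocks get_matching_blocks_alt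
  dsimp only
  rw [gmbLoop_eq_flat orig reg_index _ _ _ le_rfl]
  simp [Int.toNat_natCast]
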